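-- pv_equiv track=rewrite | github.com/YallaPapi/snowflake | src/screenplay_engine/pipeline/steps/step_5_board.py | _longest_gap
-- ===== SOURCE A (Python) =====
-- from typing import Dict, Any, Optional, Tuple, List
--
-- def _longest_gap(colors: List[str], target: str) -> Tuple[int, int, int]:
--     max_gap = -1
--     max_start = 0
--     max_end = -1
--     current_start = 0
--     current_gap = 0
--
--     for idx, color in enumerate(colors):
--         if color == target:
--             if current_gap > max_gap:
--                 max_gap = current_gap
--                 max_start = current_start
--                 max_end = idx - 1
--             current_start = idx + 1
--             current_gap = 0
--         else:
--             current_gap += 1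
--
--     if current_gap > max_gap:
--         max_gap = current_gap
--         max_start = current_start
--         max_end = len(colors) - 1
--
--     if max_gap < 0:
--         return 0, 0, -1
--     return max_gap, max_start, max_end
-- ===== SOURCE B (Python) =====
-- from typing import List, Tuple
--
-- def _longest_gap(colors: List[str], target: str) -> Tuple[int, int, int]:
--     positions = [i for i, c in enumerate(colors) if c == target]
--     max_gap, max_start, max_end = -1, 0, -1
--     prev = -1
--     for p in positions + [len(colors)]:
--         length = p - prev - 1
--         if length > max_gap:
--             max_gap, max_start, max_end = length, prev + 1, p - 1
--         prev = p
--     return max_gap, max_start, max_end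
-- ===== Notes on version B (the rewrite author's own statement) =====
-- stated objective: alternative
-- what changed: Replaces A's single bound-tracking sweep with counters (current_start/current_gap) and a post-loop fixup by a two-pass scheme: first collect all indices of the target, then scan consecutive boundary pairs (-1, positions..., len) computing each segment's length/start/end directly; the unreachable max_gap<0 fallback disappears.
import Mathlib
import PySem

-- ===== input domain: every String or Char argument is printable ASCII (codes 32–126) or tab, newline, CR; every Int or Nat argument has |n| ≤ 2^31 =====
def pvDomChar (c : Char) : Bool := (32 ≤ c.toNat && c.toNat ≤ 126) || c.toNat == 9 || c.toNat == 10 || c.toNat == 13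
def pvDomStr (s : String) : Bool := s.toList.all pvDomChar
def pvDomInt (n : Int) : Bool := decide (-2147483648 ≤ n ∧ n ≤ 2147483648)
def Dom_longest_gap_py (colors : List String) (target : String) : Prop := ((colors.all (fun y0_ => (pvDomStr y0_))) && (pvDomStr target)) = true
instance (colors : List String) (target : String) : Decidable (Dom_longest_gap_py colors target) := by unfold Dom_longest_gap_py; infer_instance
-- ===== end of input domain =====

-- B replaces A's bound-tracking sweep by a target-index table plus a scan over
-- consecutive boundary pairs; same value on every input (objective: alternative).

-- shared transliteration of Python's enumerate (start index k)
def pvEnum (k : Nat) : List String → List (Nat × String)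
  | [] => []
  | c :: cs => (k, c) :: pvEnum (k + 1) cs

-- ===== PORT A =====
-- loop body of A: state (max_gap, max_start, max_end, current_start, current_gap)
def stepA (target : String) (s : Int × Int × Int × Int × Int) (ic : Nat × String) :
    Int × Int × Int × Int × Int :=
  if ic.2 == target then
    if s.2.2.2.2 > s.1 then (s.2.2.2.2, s.2.2.2.1, (ic.1 : Int) - 1, (ic.1 : Int) + 1, 0)
    else (s.1, s.2.1, s.2.2.1, (ic.1 : Int) + 1, 0)
  else (s.1, s.2.1, s.2.2.1, s.2.2.2.1, s.2.2.2.2 + 1)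

def longest_gap_py (colors : List String) (target : String) : Int × Int × Int :=
  let st := (pvEnum 0 colors).foldl (stepA target) (-1, 0, -1, 0, 0)
  let st2 := if st.2.2.2.2 > st.1 then (st.2.2.2.2, st.2.2.2.1, (colors.length : Int) - 1)
             else (st.1, st.2.1, st.2.2.1)
  if st2.1 < 0 then (0, 0, -1) else st2

-- ===== PORT B =====
-- loop body of B: state (max_gap, max_start, max_end, prev)
def stepB (s : Int × Int × Int × Int) (p : Int) : Int × Int × Int × Int :=
  let len := p - s.2.2.2 - 1
  if len > s.1 then (len, s.2.2.2 + 1, p - 1, p) else (s.1, s.2.1, s.2.2.1, p)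

def longest_gap_py_alt (colors : List String) (target : String) : Int × Int × Int :=
  let positions := ((pvEnum 0 colors).filter (fun ic => ic.2 == target)).map
    (fun ic => (ic.1 : Int))
  let st := (positions ++ [(colors.length : Int)]).foldl stepB (-1, 0, -1, -1)
  (st.1, st.2.1, st.2.2.1)

-- ===== PRECONDITION & SPEC =====
def Spec_longest_gap_py (colors : List String) (target : String) (out : Int × Int × Int) : Prop := out = longest_gap_py_alt colors target
instance (colors : List String) (target : String) (out : Int × Int × Int) : Decidable (Spec_longest_gap_py colors target out) := by unfold Spec_longest_gap_py; infer_instance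

-- ===== CLAIM (what is proved, stated in full; the proofs are below) =====
def Claim_equal_longest_gap_py : Prop := ∀ (colors : List String) (target : String), Dom_longest_gap_py colors target → Spec_longest_gap_py colors target (longest_gap_py colors target)

-- ===== LEMMAS AND PROOFS =====

-- Core invariant: starting A's loop at index k with current_gap = k - current_start
-- (and the gap nonnegative), A's fold over the rest followed by A's final fixup
-- equals B's fold over the remaining target positions plus the final boundary,
-- started at prev = current_start - 1; moreover the resulting max_gap is ≥ 0.
theorem core (target : String) (l : List String) : ∀ (k : Nat) (mg ms me cs : Int),
    0 ≤ (k : Int) - cs →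
    (let st := (pvEnum k l).foldl (stepA target) (mg, ms, me, cs, (k : Int) - cs)
     let st2 := if st.2.2.2.2 > st.1 then (st.2.2.2.2, st.2.2.2.1, ((k + l.length : Nat) : Int) - 1)
                else (st.1, st.2.1, st.2.2.1)
     let stB := ((((pvEnum k l).filter (fun ic => ic.2 == target)).map (fun ic => (ic.1 : Int)))
                  ++ [((k + l.length : Nat) : Int)]).foldl stepB (mg, ms, me, cs - 1)
     st2 = (stB.1, stB.2.1, stB.2.2.1) ∧ 0 ≤ st2.1) := by
  induction l with
  | nil =>
      intro k mg ms me cs h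
      simp only [pvEnum, List.foldl, List.filter, List.map, List.nil_append,
        List.length_nil, Nat.add_zero, stepB]
      constructor
      · split_ifs with h1 h2 h2 <;> simp_all <;> omega
      · split_ifs with h1 <;> simp <;> omega
  | cons c rest ih =>
      intro k mg ms me cs h
      simp only [pvEnum, List.foldl, List.filter_cons, List.length_cons]
      by_cases hc : (c == target) = true
      · simp only [hc, if_pos, stepA, List.map_cons, List.cons_append, List.foldl_cons]
        by_cases hgt : (k : Int) - cs > mg
        · simp only [if_pos hgt]
          have hB : stepB (mg, ms, me, cs - 1) (k : Int)
              = ((k : Int) - cs, cs, (k : Int) - 1, (k : Int)) := by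
            simp only [stepB]
            have h1 : (k : Int) - (cs - 1) - 1 = (k : Int) - cs := by ring
            have h2 : cs - 1 + 1 = cs := by ring
            rw [h1, if_pos hgt, h2]
          rw [hB]
          have := ih (k + 1) ((k : Int) - cs) cs ((k : Int) - 1) ((k : Int) + 1)
            (by push_cast; omega)
          have hcg : ((k + 1 : Nat) : Int) - ((k : Int) + 1) = 0 := by push_cast; ring
          rw [hcg] at this
          have hprev : (k : Int) + 1 - 1 = (k : Int) := by ring
          rw [hprev] at this
          have hlen : (k + 1 + rest.length : Nat) = (k + (rest.length + 1) : Nat) := by omega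
          rw [hlen] at this
          exact this
        · simp only [if_neg hgt]
          have hB : stepB (mg, ms, me, cs - 1) (k : Int) = (mg, ms, me, (k : Int)) := by
            simp only [stepB]
            have : (k : Int) - (cs - 1) - 1 = (k : Int) - cs := by ring
            rw [this, if_neg hgt]
          rw [hB]
          have := ih (k + 1) mg ms me ((k : Int) + 1) (by push_cast; omega)
          have hcg : ((k + 1 : Nat) : Int) - ((k : Int) + 1) = 0 := by push_cast; ring
          rw [hcg] at this
          have hprev : (k : Int) + 1 - 1 = (k : Int) := by ring
          rw [hprev] at this
          have hlen : (k + 1 + rest.length : Nat) = (k + (rest.length + 1) : Nat) := by omega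
          rw [hlen] at this
          exact this
      · simp only [hc, if_neg, Bool.false_eq_true, not_false_iff, stepA]
        have := ih (k + 1) mg ms me cs (by push_cast; omega)
        have hcg : ((k + 1 : Nat) : Int) - cs = (k : Int) - cs + 1 := by push_cast; ring
        rw [hcg] at this
        have hlen : (k + 1 + rest.length : Nat) = (k + (rest.length + 1) : Nat) := by omega
        rw [hlen] at this
        exact this

-- ===== VERDICT (by name: the statement is the Claim_ definition above) =====
theorem longest_gap_py_spec : Claim_equal_longest_gap_py := by
  intro colors target _
  unfold Spec_longest_gap_py longest_gap_py longest_gap_py_alt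
  have h := core target colors 0 (-1) 0 (-1) 0 (by norm_num)
  simp only [Nat.cast_zero, sub_zero, Nat.zero_add, zero_sub] at h
  obtain ⟨heq, hge⟩ := h
  simp only []
  rw [if_neg (by omega), heq]
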